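-- pv_equiv track=rewrite | github.com/heojungeun/codingtestPractice | level1&2/17683.py | solution
-- ===== SOURCE A (Python) =====
-- def solution(m, musicinfos):
--     answer = []
--     for idx, x in enumerate(musicinfos):
--         stime, etime, title, music = x.split(",")
--         bhour, bmin = map(int,stime.split(":"))
--         ahour, amin = map(int,etime.split(":"))
--         if amin-bmin < 0:
--             submin = amin-bmin + 60
--             ahour -= 1
--         else:
--             submin = amin - bmin
--         submin = (ahour-bhour)*60+submin
--         be = ["C#","D#","F#","G#","A#"]
--         af = ["c","d","f","g","a"]
--         for i in range(5):
--             m = m.replace(be[i],af[i])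
--             music = music.replace(be[i],af[i])
--         p, r = divmod(submin,len(music))
--         ori = music*p + music[:r]
--         if m in ori:
--             answer.append((submin,idx,title))
--     if len(answer):
--         answer.sort(key=lambda x: (-x[0], x[1]))
--         return answer[0][2]
--     return "(None)"
-- ===== SOURCE B (Python) =====
-- def _match(m, info):
--     """Parse one broadcast record; return (normalized m, (duration, title) if the
--     normalized melody m occurs in the played string, else None)."""
--     stime, etime, title, music = info.split(",")
--     bh, bm = map(int, stime.split(":"))
--     ah, am = map(int, etime.split(":"))
--     if am - bm < 0:
--         submin = am - bm + 60
--         ah -= 1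
--     else:
--         submin = am - bm
--     submin = (ah - bh) * 60 + submin
--     for sharp, flat in (("C#", "c"), ("D#", "d"), ("F#", "f"), ("G#", "g"), ("A#", "a")):
--         m = m.replace(sharp, flat)
--         music = music.replace(sharp, flat)
--     p, r = divmod(submin, len(music))
--     ori = music * p + music[:r]
--     return m, ((submin, title) if m in ori else None)
--
--
-- def solution(m, musicinfos):
--     best = None  # (duration, title) of the best match so far
--     for info in musicinfos:
--         m, found = _match(m, info)
--         if found is not None and (best is None or found[0] > best[0]):
--             best = found
--     return best[1] if best is not None else "(None)"
-- ===== Notes on version B (the rewrite author's own statement) =====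
-- stated objective: simpler
-- what changed: B drops A's collect-all-matches list and the final sort(key=(-submin, idx)) and instead keeps a single running best (duration, title) pair, updated with a strict > so the earliest match wins duration ties; Pre_ excludes only malformed records ('H:M,H:M,title,music' shape broken, unparsable time fields or empty melody), on which A raises ValueError or ZeroDivisionError.
import Mathlib
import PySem

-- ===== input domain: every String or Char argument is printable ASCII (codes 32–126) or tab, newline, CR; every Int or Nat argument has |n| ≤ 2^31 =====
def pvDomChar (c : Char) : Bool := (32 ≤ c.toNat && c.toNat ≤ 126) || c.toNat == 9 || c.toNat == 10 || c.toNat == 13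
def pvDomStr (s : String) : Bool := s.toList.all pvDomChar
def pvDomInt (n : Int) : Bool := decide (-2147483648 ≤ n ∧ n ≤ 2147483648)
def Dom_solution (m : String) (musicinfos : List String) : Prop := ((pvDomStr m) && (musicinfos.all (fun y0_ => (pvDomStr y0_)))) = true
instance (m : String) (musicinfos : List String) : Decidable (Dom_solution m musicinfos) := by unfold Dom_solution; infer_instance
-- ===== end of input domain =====

-- B replaces A's collect-matches-then-sort(key=(-submin, idx)) by a single-pass running maximum
-- (strict >, earliest match wins ties); objective: simpler. Note: A reassigns the parameter `m`
-- (a local rebinding, not a caller-visible mutation); both ports thread it identically.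


-- ===== PORT A =====
-- loop body of A's `for idx, x in enumerate(musicinfos)`; state = (current m, answer list of (submin, idx, title))
def solStepA (st : List Char × List (Int × Int × List Char)) (ix : Int × List Char) :
    List Char × List (Int × Int × List Char) :=
  match PySem.Chars.splitOn ix.2 [','] with
  | [stime, etime, title, music] =>
    match PySem.Chars.splitOn stime [':'], PySem.Chars.splitOn etime [':'] with
    | [bhs, bms], [ahs, ams] =>
      match PySem.Int.ofChars? bhs, PySem.Int.ofChars? bms, PySem.Int.ofChars? ahs, PySem.Int.ofChars? ams with
      | some bhour, some bmin, some ahour0, some amin =>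
        let sa : Int × Int := if amin - bmin < 0 then (amin - bmin + 60, ahour0 - 1) else (amin - bmin, ahour0)
        let submin : Int := (sa.2 - bhour) * 60 + sa.1
        -- `for i in range(5): m = m.replace(be[i], af[i]); music = music.replace(be[i], af[i])`
        let be : List (List Char) := [['C','#'],['D','#'],['F','#'],['G','#'],['A','#']]
        let af : List (List Char) := [['c'],['d'],['f'],['g'],['a']]
        let mm : List Char × List Char := (PySem.List.pyRange 0 5 1).foldl
          (fun (st2 : List Char × List Char) i =>
            (PySem.Chars.replace st2.1 (PySem.List.pyGetD be i []) (PySem.List.pyGetD af i []),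
             PySem.Chars.replace st2.2 (PySem.List.pyGetD be i []) (PySem.List.pyGetD af i [])))
          (st.1, music)
        match PySem.Int.divmod? submin ((mm.2.length : Int)) with
        | some pr =>
          -- `ori = music*p + music[:r]` ; str*int is replicate-and-flatten (exact: p ≤ 0 gives "")
          let ori := (List.replicate pr.1.toNat mm.2).flatten ++ PySem.Chars.slice mm.2 none (some pr.2)
          if PySem.Chars.isIn mm.1 ori then (mm.1, st.2 ++ [(submin, ix.1, title)]) else (mm.1, st.2)
        | none => (mm.1, st.2)       -- ZeroDivisionError in Python; outside Pre_
      | _, _, _, _ => (st.1, st.2)   -- ValueError in Python; outside Pre_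
    | _, _ => (st.1, st.2)           -- ValueError in Python; outside Pre_
  | _ => (st.1, st.2)                -- ValueError in Python; outside Pre_

def solution (m : String) (musicinfos : List String) : String :=
  let res := (PySem.List.enumerate (musicinfos.map String.toList)).foldl solStepA (m.toList, [])
  if res.2.length ≠ 0 then
    match PySem.List.sorted2 res.2 (fun t => -t.1) (fun t => t.2.1) false with
    | t :: _ => String.ofList t.2.2
    | [] => "(None)"
  else "(None)"

-- ===== PORT B =====
def notePairs : List (List Char × List Char) :=
  [(['C','#'],['c']), (['D','#'],['d']), (['F','#'],['f']), (['G','#'],['g']), (['A','#'],['a'])]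

-- port of Source B's `_match`: (normalized m, some (duration, title) iff m occurs in the played string)
def matchInfo (mc : List Char) (info : List Char) : List Char × Option (Int × List Char) :=
  match PySem.Chars.splitOn info [','] with
  | [stime, etime, title, music] =>
    match PySem.Chars.splitOn stime [':'], PySem.Chars.splitOn etime [':'] with
    | [bhs, bms], [ahs, ams] =>
      match PySem.Int.ofChars? bhs, PySem.Int.ofChars? bms, PySem.Int.ofChars? ahs, PySem.Int.ofChars? ams with
      | some bh, some bm, some ah0, some am =>
        let sa : Int × Int := if am - bm < 0 then (am - bm + 60, ah0 - 1) else (am - bm, ah0)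
        let submin : Int := (sa.2 - bh) * 60 + sa.1
        let mm : List Char × List Char := notePairs.foldl
          (fun (st2 : List Char × List Char) pr =>
            (PySem.Chars.replace st2.1 pr.1 pr.2, PySem.Chars.replace st2.2 pr.1 pr.2))
          (mc, music)
        match PySem.Int.divmod? submin ((mm.2.length : Int)) with
        | some pr =>
          let ori := (List.replicate pr.1.toNat mm.2).flatten ++ PySem.Chars.slice mm.2 none (some pr.2)
          (mm.1, if PySem.Chars.isIn mm.1 ori then some (submin, title) else none)
        | none => (mm.1, none)
      | _, _, _, _ => (mc, none)
    | _, _ => (mc, none)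
  | _ => (mc, none)

-- loop body of B: state = (current m, best (duration, title) so far)
def solStepB (st : List Char × Option (Int × List Char)) (info : List Char) :
    List Char × Option (Int × List Char) :=
  let r := matchInfo st.1 info
  match r.2, st.2 with
  | some f, none => (r.1, some f)
  | some f, some b => (r.1, if f.1 > b.1 then some f else some b)
  | none, _ => (r.1, st.2)

def solution_alt (m : String) (musicinfos : List String) : String :=
  let res := (musicinfos.map String.toList).foldl solStepB (m.toList, none)
  match res.2 with
  | some b => String.ofList b.2
  | none => "(None)"

-- ===== PRECONDITION & SPEC =====
-- Pre_ excludes only malformed records: each record must split as "H:M,H:M,title,music" with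
-- int-parsable time fields and a nonempty melody — otherwise A raises ValueError (bad unpack /
-- bad int) or ZeroDivisionError (empty melody) and returns no value.
def itemOK (x : List Char) : Bool :=
  match PySem.Chars.splitOn x [','] with
  | [stime, etime, _, music] =>
    match PySem.Chars.splitOn stime [':'], PySem.Chars.splitOn etime [':'] with
    | [bhs, bms], [ahs, ams] =>
      match PySem.Int.ofChars? bhs, PySem.Int.ofChars? bms, PySem.Int.ofChars? ahs, PySem.Int.ofChars? ams with
      | some _, some _, some _, some _ => !music.isEmpty
      | _, _, _, _ => false
    | _, _ => false
  | _ => false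

def Pre_solution (m : String) (musicinfos : List String) : Prop :=
  (musicinfos.all (fun x => itemOK x.toList)) = true
instance (m : String) (musicinfos : List String) : Decidable (Pre_solution m musicinfos) := by
  unfold Pre_solution; infer_instance

def pvWitness_solution : String × List String :=
  ("ABC", ["12:00,12:14,HELLO,C#DEFGAB", "13:00,13:05,WORLD,ABCDEF"])

def Spec_solution (m : String) (musicinfos : List String) (out : String) : Prop := out = solution_alt m musicinfos
instance (m : String) (musicinfos : List String) (out : String) : Decidable (Spec_solution m musicinfos out) := by unfold Spec_solution; infer_instance

-- ===== CLAIM (what is proved, stated in full; the proofs are below) =====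
def Claim_equal_solution : Prop := ∀ (m : String) (musicinfos : List String), Dom_solution m musicinfos → Pre_solution m musicinfos → Spec_solution m musicinfos (solution m musicinfos)

-- ===== LEMMAS AND PROOFS =====

set_option maxHeartbeats 2000000 in
theorem stepA_eq (mc : List Char) (ans : List (Int × Int × List Char)) (idx : Int) (x : List Char) :
    solStepA (mc, ans) (idx, x)
      = ((matchInfo mc x).1,
         match (matchInfo mc x).2 with
         | some f => ans ++ [(f.1, idx, f.2)]
         | none => ans) := by
  show (match PySem.Chars.splitOn x [','] with
  | [stime, etime, title, music] =>
    match PySem.Chars.splitOn stime [':'], PySem.Chars.splitOn etime [':'] with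
    | [bhs, bms], [ahs, ams] =>
      match PySem.Int.ofChars? bhs, PySem.Int.ofChars? bms, PySem.Int.ofChars? ahs, PySem.Int.ofChars? ams with
      | some bhour, some bmin, some ahour0, some amin =>
        let sa : Int × Int := if amin - bmin < 0 then (amin - bmin + 60, ahour0 - 1) else (amin - bmin, ahour0)
        let submin : Int := (sa.2 - bhour) * 60 + sa.1
        let mm : List Char × List Char := notePairs.foldl
          (fun (st2 : List Char × List Char) pr =>
            (PySem.Chars.replace st2.1 pr.1 pr.2, PySem.Chars.replace st2.2 pr.1 pr.2))
          (mc, music)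
        match PySem.Int.divmod? submin ((mm.2.length : Int)) with
        | some pr =>
          let ori := (List.replicate pr.1.toNat mm.2).flatten ++ PySem.Chars.slice mm.2 none (some pr.2)
          if PySem.Chars.isIn mm.1 ori then (mm.1, ans ++ [(submin, idx, title)]) else (mm.1, ans)
        | none => (mm.1, ans)
      | _, _, _, _ => (mc, ans)
    | _, _ => (mc, ans)
  | _ => (mc, ans))
      = ((matchInfo mc x).1,
         match (matchInfo mc x).2 with
         | some f => ans ++ [(f.1, idx, f.2)]
         | none => ans)
  unfold matchInfo
  rcases h1 : PySem.Chars.splitOn x [','] with _ | ⟨stime, _ | ⟨etime, _ | ⟨title, _ | ⟨music, _ | ⟨z1, zs⟩⟩⟩⟩⟩ <;> try rfl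
  dsimp only
  rcases h2 : PySem.Chars.splitOn stime [':'] with _ | ⟨bhs, _ | ⟨bms, _ | ⟨z2, zs2⟩⟩⟩ <;> try rfl
  rcases h3 : PySem.Chars.splitOn etime [':'] with _ | ⟨ahs, _ | ⟨ams, _ | ⟨z3, zs3⟩⟩⟩ <;> try rfl
  dsimp only
  rcases h4 : PySem.Int.ofChars? bhs with _ | bhour <;> try rfl
  rcases h5 : PySem.Int.ofChars? bms with _ | bmin <;> try rfl
  rcases h6 : PySem.Int.ofChars? ahs with _ | ahour0 <;> try rfl
  rcases h7 : PySem.Int.ofChars? ams with _ | amin <;> try rfl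
  dsimp only
  split
  case _ pr heq => split <;> rfl
  case _ heq => rfl
-- the first element of maximal duration, as A's answer list is scanned left to right
def fmStep (b : Option (Int × Int × List Char)) (t : Int × Int × List Char) :
    Option (Int × Int × List Char) :=
  match b with
  | none => some t
  | some p => if p.1 < t.1 then some t else some p

def firstMax (ans : List (Int × Int × List Char)) : Option (Int × Int × List Char) :=
  ans.foldl fmStep none

def projBT (t : Int × Int × List Char) : Int × List Char := (t.1, t.2.2)

theorem firstMax_append (ans : List (Int × Int × List Char)) (t : Int × Int × List Char) :
    firstMax (ans ++ [t]) = fmStep (firstMax ans) t := by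
  simp [firstMax, List.foldl_append]

theorem stepB_eq (mc : List Char) (ans : List (Int × Int × List Char)) (idx : Int) (x : List Char) :
    solStepB (mc, (firstMax ans).map projBT) x
      = ((matchInfo mc x).1,
         (firstMax (match (matchInfo mc x).2 with
                    | some f => ans ++ [(f.1, idx, f.2)]
                    | none => ans)).map projBT) := by
  unfold solStepB
  rcases hr : (matchInfo mc x).2 with _ | f
  · rcases hb : firstMax ans with _ | p <;> simp [hr]
  · rcases hb : firstMax ans with _ | p <;>
      simp [hr, hb, firstMax_append, fmStep, projBT] <;>
      rcases lt_or_ge p.1 f.1 with h | h <;>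
      simp [h, not_lt_of_ge, projBT]
theorem loop_inv (xs : List (List Char)) :
    ∀ (i : Int) (mc : List Char) (ans : List (Int × Int × List Char)),
    (∀ t ∈ ans, t.2.1 < i) → ans.Pairwise (fun a b => a.2.1 < b.2.1) →
      xs.foldl solStepB (mc, (firstMax ans).map projBT)
          = (((PySem.List.enumerate xs i).foldl solStepA (mc, ans)).1,
             (firstMax ((PySem.List.enumerate xs i).foldl solStepA (mc, ans)).2).map projBT)
        ∧ (∀ t ∈ ((PySem.List.enumerate xs i).foldl solStepA (mc, ans)).2, t.2.1 < i + xs.length)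
        ∧ ((PySem.List.enumerate xs i).foldl solStepA (mc, ans)).2.Pairwise (fun a b => a.2.1 < b.2.1) := by
  induction xs with
  | nil =>
    intro i mc ans hlt hpw
    refine ⟨rfl, ?_, hpw⟩
    intro t ht
    have := hlt t ht
    simp only [List.length_nil]
    omega
  | cons x xs ih =>
    intro i mc ans hlt hpw
    rw [PySem.List.enumerate_cons]
    simp only [List.foldl_cons]
    rw [stepA_eq mc ans i x, stepB_eq mc ans i x]
    have hlt' : ∀ t ∈ (match (matchInfo mc x).2 with
                       | some f => ans ++ [(f.1, i, f.2)]
                       | none => ans), t.2.1 < i + 1 := by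
      rcases hr : (matchInfo mc x).2 with _ | f <;> dsimp only
      · intro t ht
        have := hlt t ht
        omega
      · intro t ht
        rcases List.mem_append.1 ht with h | h
        · have := hlt t h
          omega
        · rcases List.mem_singleton.1 h with rfl
          simp
    have hpw' : (match (matchInfo mc x).2 with
                 | some f => ans ++ [(f.1, i, f.2)]
                 | none => ans).Pairwise (fun (a b : Int × Int × List Char) => a.2.1 < b.2.1) := by
      rcases hr : (matchInfo mc x).2 with _ | f <;> dsimp only
      · exact hpw
      · rw [List.pairwise_append]
        refine ⟨hpw, by simp, ?_⟩
        intro a ha b hb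
        rcases List.mem_singleton.1 hb with rfl
        exact hlt a ha
    have := ih (i + 1) (matchInfo mc x).1 _ hlt' hpw'
    refine ⟨this.1, ?_, this.2.2⟩
    have h2 := this.2.1
    intro t ht
    have := h2 t ht
    simp only [List.length_cons] at *
    omega
def bef (a b : Int × Int × List Char) : Bool :=
  decide ((-a.1 : Int) < -b.1) || (!decide ((-b.1 : Int) < -a.1) && decide (a.2.1 < b.2.1))

theorem sorted2_eq_foldl (ans : List (Int × Int × List Char)) :
    PySem.List.sorted2 ans (fun t => -t.1) (fun t => t.2.1) false
      = ans.foldl (fun acc x => PySem.List.insertBy bef x acc) [] := rfl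

theorem head_insertBy (x : Int × Int × List Char) (acc : List (Int × Int × List Char)) :
    (PySem.List.insertBy bef x acc).head? =
      match acc with
      | [] => some x
      | h :: _ => if bef x h then some x else some h := by
  cases acc <;> simp [PySem.List.insertBy] <;> split <;> simp

theorem ins_loop (l : List (Int × Int × List Char)) :
    ∀ (acc : List (Int × Int × List Char)) (b : Option (Int × Int × List Char)),
    (∀ y ∈ acc, ∀ z ∈ l, y.2.1 < z.2.1) →
    l.Pairwise (fun (a b : Int × Int × List Char) => a.2.1 < b.2.1) →
    acc.head? = b →
    (l.foldl (fun acc x => PySem.List.insertBy bef x acc) acc).head? = l.foldl fmStep b := by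
  induction l with
  | nil => intro acc b _ _ hb; simpa using hb
  | cons x l ih =>
    intro acc b hacc hpw hb
    simp only [List.foldl_cons]
    apply ih
    · intro y hy z hz
      rcases (PySem.List.mem_insertBy bef x y acc).1 hy with rfl | hy'
      · exact (List.pairwise_cons.1 hpw).1 z hz
      · exact hacc y hy' z (List.mem_cons_of_mem x hz)
    · exact (List.pairwise_cons.1 hpw).2
    · rw [head_insertBy]
      cases acc with
      | nil =>
        simp at hb
        subst hb
        rfl
      | cons h t =>
        simp at hb
        subst hb
        have hlt : h.2.1 < x.2.1 := hacc h (List.mem_cons_self) x List.mem_cons_self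
        have hbef : bef x h = decide (h.1 < x.1) := by
          simp [bef]
          omega
        show (if bef x h = true then some x else some h) = fmStep (some h) x
        rw [hbef]
        simp [fmStep]
theorem head_sorted2 (ans : List (Int × Int × List Char))
    (h : ans.Pairwise (fun (a b : Int × Int × List Char) => a.2.1 < b.2.1)) :
    (PySem.List.sorted2 ans (fun t => -t.1) (fun t => t.2.1) false).head? = firstMax ans := by
  rw [sorted2_eq_foldl]
  exact ins_loop ans [] none (by simp) h rfl

theorem foldl_fmStep_some (l : List (Int × Int × List Char)) :
    ∀ (b : Int × Int × List Char), ∃ c, l.foldl fmStep (some b) = some c := by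
  induction l with
  | nil => intro b; exact ⟨b, rfl⟩
  | cons x l ih =>
    intro b
    simp only [List.foldl_cons, fmStep]
    split <;> apply ih

theorem firstMax_some (a : Int × Int × List Char) (l : List (Int × Int × List Char)) :
    ∃ c, firstMax (a :: l) = some c := by
  unfold firstMax
  simp only [List.foldl_cons]
  exact foldl_fmStep_some l a

theorem solution_eq_alt : ∀ (m : String) (musicinfos : List String),
    solution m musicinfos = solution_alt m musicinfos := by
  intro m mi
  have L := loop_inv (mi.map String.toList) 0 m.toList [] (by simp) (by simp)
  rw [show (firstMax ([] : List (Int × Int × List Char))).map projBT = none from rfl] at L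
  unfold solution solution_alt
  dsimp only
  rw [L.1]
  have hpw := L.2.2
  cases hA : ((PySem.List.enumerate (mi.map String.toList) 0).foldl solStepA (m.toList, [])).2 with
  | nil => simp [firstMax]
  | cons a l =>
    obtain ⟨c, hc⟩ := firstMax_some a l
    have hhead := head_sorted2 (a :: l) (hA ▸ hpw)
    rw [hc] at hhead
    cases hs : PySem.List.sorted2 (a :: l) (fun t => -t.1) (fun t => t.2.1) false with
    | nil => rw [hs] at hhead; simp at hhead
    | cons c' r =>
      rw [hs] at hhead
      simp at hhead
      subst hhead
      simp [hc, projBT]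

-- ===== VERDICT (by name: the statement is the Claim_ definition above) =====
theorem solution_spec : Claim_equal_solution := by
  intro m musicinfos _ _
  unfold Spec_solution
  exact solution_eq_alt m musicinfos
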